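-- pv_equiv track=rewrite | github.com/jarmax01/PythonResearches | maths/Binary.py | encodeToBinary
-- ===== SOURCE A (Python) =====
-- def encodeToBinary(value, octet):
--     value = abs(value)
--     binary = []  # List of your octet composed of 8 bits
--     rest = value  # Local variable used for decomposition in power of two
--     power = 0
--     while value > maxNumberOctets(octet):
--         octet += 1
--     for i in range(octet):
--         binary.insert(i, [0, 0, 0, 0, 0, 0, 0, 0])
--     while rest != 0:
--         if rest >= 2 ** power:
--             power += 1
--         else:
--             if power != 0:
--                 power -= 1
--             rest -= 2 ** power
--             localOctet = binary[power // 8]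
--             localOctet[power%8] = 1
--             power = 0
--     binary.reverse()
--     for octet in binary:
--         octet.reverse()
--     return binary
--
-- def maxNumberOctets(octet):
--     number = 0
--     signed_value = 0
--     for i in range(octet * 8 - signed_value):
--         number += 2 ** i
--     return number
-- ===== SOURCE B (Python) =====
-- def encodeToBinary(value, octet):
--     v = abs(value)
--     n = octet
--     if v > 0:
--         n = max(octet, (v.bit_length() + 7) // 8)
--     out = []
--     for j in range(n - 1, -1, -1):
--         byte = (v >> (8 * j)) & 0xFF
--         out.append([(byte >> b) & 1 for b in range(7, -1, -1)])
--     return out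
-- ===== Notes on version B (the rewrite author's own statement) =====
-- stated objective: faster
-- what changed: A finds each set bit by re-scanning powers of two from 0 and mutates a pre-built zero grid before reversing everything; B computes the octet count from bit_length and emits each output bit directly with shifts and masks in one pass.
import Mathlib
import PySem

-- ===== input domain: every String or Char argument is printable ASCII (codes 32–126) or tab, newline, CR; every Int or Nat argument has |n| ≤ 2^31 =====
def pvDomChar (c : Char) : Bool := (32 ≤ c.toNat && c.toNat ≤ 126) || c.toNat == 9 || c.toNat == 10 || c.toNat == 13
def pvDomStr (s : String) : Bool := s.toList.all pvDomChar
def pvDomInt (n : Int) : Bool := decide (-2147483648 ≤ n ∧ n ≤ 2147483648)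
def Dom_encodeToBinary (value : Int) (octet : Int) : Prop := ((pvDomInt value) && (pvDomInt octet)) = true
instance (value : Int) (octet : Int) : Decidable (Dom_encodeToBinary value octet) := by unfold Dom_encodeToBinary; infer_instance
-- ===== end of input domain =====

-- B replaces A's quadratic power-scan bit decomposition by a single direct pass that
-- extracts each output bit with shifts/masks (objective: faster, constant-factor on the 2^31-bounded domain).

-- ===== PORT A =====

-- maxNumberOctets: number = 0; for i in range(octet*8 - 0): number += 2**i
def maxNumberOctets (octet : Int) : Int :=
  (PySem.List.pyRange 0 (octet * 8 - 0) 1).foldl (fun number i => number + 2 ^ i.toNat) 0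

-- geometric-sum fold, needed only for maxNumberOctets_eq just below
theorem foldl_pow_aux (n : Nat) (c : Int) :
    (List.range n).foldl (fun (num : Int) (k : Nat) => num + 2 ^ k) c = c + 2 ^ n - 1 := by
  induction n generalizing c with
  | zero => simp
  | succ n ih => rw [List.range_succ, List.foldl_append, ih]; simp [pow_succ]; ring

-- closed form, needed by growOctet's termination proof (cited in decreasing_by)
theorem maxNumberOctets_eq (o : Int) : maxNumberOctets o = 2 ^ (o * 8).toNat - 1 := by
  unfold maxNumberOctets
  rw [PySem.List.pyRange_one, List.foldl_map]
  simp only [zero_add, Int.toNat_natCast, sub_zero]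
  rw [foldl_pow_aux]; ring

-- `while value > maxNumberOctets(octet): octet += 1` (value = abs(value) is nonnegative, kept as Nat)
def growOctet (v : Nat) (octet : Int) : Int :=
  if (v : Int) > maxNumberOctets octet then growOctet v (octet + 1) else octet
termination_by ((1 - octet).toNat, v + 1 - 2 ^ (octet * 8).toNat)
decreasing_by
  rename_i h
  rw [maxNumberOctets_eq] at h
  by_cases ho : octet < 1
  · exact Prod.Lex.left _ _ (by omega)
  · have he : ((octet + 1) * 8).toNat = (octet * 8).toNat + 8 := by omega
    have h1 : (1 - (octet + 1)).toNat = (1 - octet).toNat := by omega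
    rw [h1, he]
    apply Prod.Lex.right
    have hp : 1 ≤ 2 ^ (octet * 8).toNat := Nat.one_le_two_pow
    have hv : 2 ^ (octet * 8).toNat ≤ v := by
      have : ((2 ^ (octet * 8).toNat : Nat) : Int) ≤ (v : Int) := by push_cast; omega
      exact_mod_cast this
    have : 2 ^ ((octet * 8).toNat + 8) = 256 * 2 ^ (octet * 8).toNat := by ring
    omega

-- localOctet = binary[power//8]; localOctet[power%8] = 1   (in-place update of the grid)
def setBit (binary : List (List Int)) (p : Nat) : List (List Int) :=
  binary.set (p / 8) ((binary.getD (p / 8) []).set (p % 8) 1)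

-- the decomposition loop: while rest != 0: … ; rest and power are nonnegative throughout in
-- Python (rest = abs(value) and only the top bit is ever subtracted), so Nat is exact here
def aLoop (rest power : Nat) (binary : List (List Int)) : List (List Int) :=
  if rest = 0 then binary
  else if 2 ^ power ≤ rest then aLoop rest (power + 1) binary
  else
    -- if power != 0: power -= 1; rest -= 2**power; binary[power//8][power%8] = 1; power = 0
    aLoop (rest - 2 ^ (if power ≠ 0 then power - 1 else power)) 0
      (setBit binary (if power ≠ 0 then power - 1 else power))
termination_by (rest, rest + 1 - 2 ^ power)
decreasing_by
  · apply Prod.Lex.right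
    rename_i h1 h2
    have : 2 ^ (power + 1) = 2 * 2 ^ power := by ring
    have hp : 1 ≤ 2 ^ power := Nat.one_le_two_pow
    omega
  · apply Prod.Lex.left
    rename_i h1 h2
    split <;>
    · have := Nat.one_le_two_pow (n := power - 1)
      have := Nat.one_le_two_pow (n := power)
      omega

def encodeToBinary (value : Int) (octet : Int) : List (List Int) :=
  let v := value.natAbs                    -- value = abs(value)
  let octet2 := growOctet v octet          -- the while-grow loop
  -- for i in range(octet): binary.insert(i, [0]*8)  (insert at i = current length, i.e. append)
  let binary := (PySem.List.pyRange 0 octet2 1).foldl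
      (fun b i => PySem.List.insert b i [0, 0, 0, 0, 0, 0, 0, 0]) []
  let binary2 := aLoop v 0 binary
  binary2.reverse.map List.reverse         -- binary.reverse(); each octet.reverse()

-- ===== PORT B =====
def encodeToBinary_alt (value : Int) (octet : Int) : List (List Int) :=
  let v := value.natAbs                    -- v = abs(value)
  let n : Int := if 0 < v then max octet (PySem.Int.floordiv ((PySem.Int.bitLength (v : Int) : Int) + 7) 8) else octet
  -- for j in range(n-1, -1, -1): out.append([(byte >> b) & 1 for b in range(7,-1,-1)])
  (PySem.List.pyRange (n - 1) (-1) (-1)).foldl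
    (fun out j =>
      let byte : Nat := (v >>> (8 * j.toNat)) &&& 255   -- j ≥ 0 on this range, so .toNat is exact
      out ++ [(PySem.List.pyRange 7 (-1) (-1)).map (fun b => (((byte >>> b.toNat) &&& 1 : Nat) : Int))]) []

-- ===== PRECONDITION & SPEC =====
def Spec_encodeToBinary (value : Int) (octet : Int) (out : List (List Int)) : Prop := out = encodeToBinary_alt value octet
instance (value : Int) (octet : Int) (out : List (List Int)) : Decidable (Spec_encodeToBinary value octet out) := by unfold Spec_encodeToBinary; infer_instance

-- ===== CLAIM (what is proved, stated in full; the proofs are below) =====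
def Claim_equal_encodeToBinary : Prop := ∀ (value : Int) (octet : Int), Dom_encodeToBinary value octet → Spec_encodeToBinary value octet (encodeToBinary value octet)

-- ===== LEMMAS AND PROOFS =====


-- the grid entry at row i, bit m (both little-endian at this point of A)
def E (g : List (List Int)) (i m : Nat) : Int := (g.getD i []).getD m 0

-- every row of the grid has 8 entries
def gridRows8 (b : List (List Int)) : Prop := ∀ j, j < b.length → (b.getD j []).length = 8

-- A's bit-decomposition loop, phase-collapsed: repeatedly strip and record the top bit
def applyBits (v : Nat) (binary : List (List Int)) : List (List Int) :=
  if v = 0 then binary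
  else applyBits (v - 2 ^ Nat.log2 v) (setBit binary (Nat.log2 v))
termination_by v
decreasing_by
  rename_i h
  have h1 : 2 ^ Nat.log2 v ≤ v := Nat.log2_self_le h
  have h2 : 1 ≤ 2 ^ Nat.log2 v := Nat.one_le_two_pow
  omega

theorem setBit_length (b : List (List Int)) (p : Nat) : (setBit b p).length = b.length := by
  simp [setBit]

-- list.set through getD (first match in core is on getElem?; this getD form is specific to the grid proofs)
theorem getD_set' {α : Type} [Inhabited α] (l : List α) (i j : Nat) (x d : α) :
    (l.set i x).getD j d = if i = j ∧ j < l.length then x else l.getD j d := by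
  rw [List.getD_eq_getElem?_getD, List.getD_eq_getElem?_getD, List.getElem?_set]
  by_cases h : i = j
  · subst h
    by_cases hj : i < l.length <;> simp [hj]
  · simp [h]

theorem rows8_setBit (b : List (List Int)) (p : Nat) (h : gridRows8 b) : gridRows8 (setBit b p) := by
  intro j hj
  rw [setBit_length] at hj
  unfold setBit
  rw [getD_set']
  split
  · rename_i hc
    rcases hc with ⟨h1, h2⟩
    subst h1
    rw [List.length_set]
    exact h _ h2
  · exact h j hj

theorem E_setBit (b : List (List Int)) (p i m : Nat) (hm : m < 8) (hrows : gridRows8 b) :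
    E (setBit b p) i m = if 8 * i + m = p ∧ i < b.length then 1 else E b i m := by
  unfold E setBit
  rw [getD_set']
  split
  · rename_i hc
    rcases hc with ⟨h1, h2⟩
    subst h1
    rw [getD_set', hrows _ h2]
    have hiff : (p % 8 = m ∧ m < 8) ↔ (8 * (p / 8) + m = p ∧ p / 8 < b.length) := by omega
    split
    · rename_i hc2
      rw [if_pos (hiff.mp hc2)]
    · rename_i hc2
      rw [if_neg (fun hh => hc2 (hiff.mpr hh))]
  · rename_i hc
    rw [if_neg (fun hh => hc (by omega))]

theorem applyBits_sub_lt (v : Nat) (h : v ≠ 0) : v - 2 ^ Nat.log2 v < v := by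
  have h1 : 2 ^ Nat.log2 v ≤ v := Nat.log2_self_le h
  have h2 : 1 ≤ 2 ^ Nat.log2 v := Nat.one_le_two_pow
  omega

theorem applyBits_length (v : Nat) : ∀ b : List (List Int), (applyBits v b).length = b.length := by
  induction v using Nat.strong_induction_on with
  | _ v ih =>
    intro b
    rw [applyBits]
    split
    · rfl
    · rename_i h
      rw [ih _ (applyBits_sub_lt v h), setBit_length]

theorem rows8_applyBits (v : Nat) : ∀ b : List (List Int), gridRows8 b → gridRows8 (applyBits v b) := by
  induction v using Nat.strong_induction_on with
  | _ v ih =>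
    intro b hb
    rw [applyBits]
    split
    · exact hb
    · rename_i h
      exact ih _ (applyBits_sub_lt v h) _ (rows8_setBit _ _ hb)

theorem E_applyBits (v : Nat) : ∀ (b : List (List Int)) (i m : Nat), m < 8 → gridRows8 b →
    E (applyBits v b) i m = if v.testBit (8 * i + m) ∧ i < b.length then 1 else E b i m := by
  induction v using Nat.strong_induction_on with
  | _ v ih =>
    intro b i m hm hrows
    rw [applyBits]
    split
    · rename_i h
      subst h
      simp [Nat.zero_testBit]
    · rename_i hv0
      have h1 : 2 ^ Nat.log2 v ≤ v := Nat.log2_self_le hv0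
      have h2 : v < 2 ^ (Nat.log2 v + 1) := Nat.lt_log2_self
      rw [ih _ (applyBits_sub_lt v hv0) _ i m hm (rows8_setBit _ _ hrows),
        E_setBit _ _ _ _ hm hrows, setBit_length]
      set t := Nat.log2 v with ht
      set k := 8 * i + m with hk
      have hv'lt : v - 2 ^ t < 2 ^ t := by rw [pow_succ] at h2; omega
      by_cases hik : i < b.length
      · by_cases hkt : k = t
        · have hf : (v - 2 ^ t).testBit k = false := by
            rw [hkt]; exact Nat.testBit_lt_two_pow hv'lt
          have htr : v.testBit k = true := by
            rw [hkt, Nat.testBit_eq_decide_div_mod_eq]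
            have : v / 2 ^ t = 1 := Nat.div_eq_of_lt_le (by omega) (by rw [pow_succ] at h2; omega)
            simp [this]
          rw [hkt] at hf htr ⊢
          simp [hf, htr, hik]
        · have heq : (v - 2 ^ t).testBit k = v.testBit k := by
            rcases Nat.lt_or_ge k t with hklt | hkge
            · have hvsplit : v = 2 ^ t + (v - 2 ^ t) := by omega
              conv_rhs => rw [hvsplit]
              rw [show Nat.testBit (2 ^ t + (v - 2 ^ t)) k
                    = Nat.testBit ((2 ^ t + (v - 2 ^ t)) % 2 ^ t) k by
                  rw [Nat.testBit_mod_two_pow]; simp [hklt]]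
              rw [Nat.add_mod_left, Nat.mod_eq_of_lt hv'lt]
            · have hk' : t < k := lt_of_le_of_ne hkge (Ne.symm hkt)
              have e1 : (v - 2 ^ t).testBit k = false :=
                Nat.testBit_lt_two_pow (lt_of_lt_of_le hv'lt (Nat.pow_le_pow_right (by norm_num) hkge))
              have e2 : v.testBit k = false :=
                Nat.testBit_lt_two_pow (lt_of_lt_of_le h2 (Nat.pow_le_pow_right (by norm_num) hk'))
              rw [e1, e2]
          rw [heq]
          simp only [hkt, false_and, if_false]
      · simp [hik]

-- the power-scan of A's loop finds the top bit: collapse one whole phase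
theorem aLoop_scan (d : Nat) : ∀ (power rest : Nat) (binary : List (List Int)),
    Nat.log2 rest = power + d → 2 ^ power ≤ rest →
    aLoop rest power binary = aLoop (rest - 2 ^ Nat.log2 rest) 0 (setBit binary (Nat.log2 rest)) := by
  induction d with
  | zero =>
    intro power rest binary hlog hle
    have hlog' : Nat.log2 rest = power := by omega
    have hr0 : rest ≠ 0 := by
      have := Nat.one_le_two_pow (n := power); omega
    have hlt : ¬ 2 ^ (power + 1) ≤ rest := by
      have hv := Nat.lt_log2_self (n := rest)
      rw [hlog'] at hv
      omega
    rw [aLoop, if_neg hr0, if_pos hle, aLoop, if_neg hr0, if_neg hlt]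
    simp only [Nat.add_sub_cancel, ne_eq, Nat.succ_ne_zero, not_false_iff, if_pos]
    rw [hlog']
  | succ d ih =>
    intro power rest binary hlog hle
    have hr0 : rest ≠ 0 := by
      have := Nat.one_le_two_pow (n := power); omega
    have hle' : 2 ^ (power + 1) ≤ rest :=
      le_trans (Nat.pow_le_pow_right (by norm_num) (by omega)) (Nat.log2_self_le hr0)
    rw [aLoop, if_neg hr0, if_pos hle]
    exact ih (power + 1) rest binary (by omega) hle' 

theorem aLoop_eq_applyBits (v : Nat) : ∀ binary : List (List Int), aLoop v 0 binary = applyBits v binary := by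
  induction v using Nat.strong_induction_on with
  | _ v ih =>
    intro binary
    by_cases h : v = 0
    · subst h
      rw [aLoop, applyBits]
      simp
    · rw [aLoop_scan (Nat.log2 v) 0 v binary (by omega) (by simpa using Nat.one_le_iff_ne_zero.mpr h),
        applyBits, if_neg h]
      exact ih _ (applyBits_sub_lt v h) _

-- the octet-growing loop computes max(octet, ceil(bit_length/8)) for v > 0, octet for v = 0
theorem growOctet_eq (v : Nat) (o : Int) :
    growOctet v o = if 0 < v then max o (PySem.Int.floordiv ((PySem.Int.bitLength (v : Int) : Int) + 7) 8) else o := by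
  have hfd : PySem.Int.floordiv ((PySem.Int.bitLength (v : Int) : Int) + 7) 8
      = (((PySem.Int.bitLength (v : Int) + 7) / 8 : Nat) : Int) := by
    rw [show ((PySem.Int.bitLength (v : Int) : Int) + 7) = (((PySem.Int.bitLength (v : Int) + 7 : Nat)) : Int) by push_cast; ring,
      show (8 : Int) = ((8 : Nat) : Int) from rfl, PySem.Int.floordiv_natCast]
  rw [hfd]
  have hblt : v < 2 ^ PySem.Int.bitLength (v : Int) := by
    have := PySem.Int.lt_two_pow_bitLength (v : Int)
    simpa using this
  refine growOctet.induct v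
    (fun o => growOctet v o = if 0 < v then max o (((PySem.Int.bitLength (v : Int) + 7) / 8 : Nat) : Int) else o) ?_ ?_ o
  · intro x hx ih
    rw [growOctet, if_pos hx, ih]
    rw [maxNumberOctets_eq] at hx
    have h2p : (0 : Int) < 2 ^ (x * 8).toNat := pow_pos (by norm_num) _
    have hv0 : 0 < v := by
      by_contra h0
      have hv : v = 0 := by omega
      rw [hv] at hx
      simp at hx
      omega
    simp only [if_pos hv0]
    have hxv : 2 ^ (x * 8).toNat ≤ v := by
      have : ((2 : Int) ^ (x * 8).toNat) ≤ (v : Int) := by omega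
      exact_mod_cast this
    have hlt : (x * 8).toNat < PySem.Int.bitLength (v : Int) :=
      (Nat.pow_lt_pow_iff_right (by norm_num)).mp (lt_of_le_of_lt hxv hblt)
    have hxc : x < (((PySem.Int.bitLength (v : Int) + 7) / 8 : Nat) : Int) := by omega
    rw [max_eq_right (by omega), max_eq_right (by omega)]
  · intro x hx
    rw [growOctet, if_neg hx]
    rw [maxNumberOctets_eq] at hx
    by_cases hv0 : 0 < v
    · simp only [if_pos hv0]
      have hvle : v < 2 ^ (x * 8).toNat := by
        have : (v : Int) < 2 ^ (x * 8).toNat := by omega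
        exact_mod_cast this
      have hbl1 : 1 ≤ PySem.Int.bitLength (v : Int) := by
        by_contra hh
        have : PySem.Int.bitLength (v : Int) = 0 := by omega
        rw [this, pow_zero] at hblt
        omega
      have hble : PySem.Int.bitLength (v : Int) ≤ (x * 8).toNat := by
        by_contra hh
        push Not at hh
        have hv0' : (v : Int) ≠ 0 := by
          have : v ≠ 0 := by omega
          exact_mod_cast this

        have h2 := PySem.Int.two_pow_bitLength_le (v : Int) hv0'
        rw [Int.natAbs_natCast] at h2
        have : 2 ^ (x * 8).toNat ≤ 2 ^ (PySem.Int.bitLength (v : Int) - 1) :=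
          Nat.pow_le_pow_right (by norm_num) (by omega)
        omega
      rw [max_eq_left (by omega)]
    · simp [hv0]

-- the insert-at-length fold builds the all-zero grid
theorem initGridNat (k : Nat) :
    (PySem.List.pyRange 0 (k : Int) 1).foldl (fun b i => PySem.List.insert b i ([0, 0, 0, 0, 0, 0, 0, 0] : List Int)) []
      = List.replicate k [0, 0, 0, 0, 0, 0, 0, 0] := by
  induction k with
  | zero => simp
  | succ k ih =>
    have hc : ((k + 1 : Nat) : Int) = (k : Int) + 1 := by push_cast; ring
    rw [hc, PySem.List.pyRange_one_succ_right (by positivity), List.foldl_append, ih]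
    simp only [List.foldl_cons, List.foldl_nil]
    have hlen : (k : Int) = PySem.List.len (List.replicate k ([0, 0, 0, 0, 0, 0, 0, 0] : List Int)) := by
      simp [PySem.List.len_eq]
    rw [hlen, PySem.List.insert_len, ← List.replicate_succ']

theorem initGrid (z : Int) :
    (PySem.List.pyRange 0 z 1).foldl (fun b i => PySem.List.insert b i ([0, 0, 0, 0, 0, 0, 0, 0] : List Int)) []
      = List.replicate z.toNat [0, 0, 0, 0, 0, 0, 0, 0] := by
  by_cases hz : z ≤ 0
  · rw [PySem.List.pyRange_one_eq_nil hz]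
    simp [Int.toNat_of_nonpos hz]
  · have : z = (z.toNat : Int) := by omega
    rw [this]
    exact initGridNat _

-- B's byte/bit extraction is testBit
theorem bit_extract (x c : Nat) (hc : c < 8) :
    ((x &&& 255) >>> c) &&& 1 = if x.testBit c then 1 else 0 := by
  have h3 : Nat.testBit ((x &&& 255) >>> c) 0 = Nat.testBit (x &&& 255) c := by
    rw [Nat.testBit_shiftRight, Nat.add_zero]
  have h4 := Nat.testBit_and x 255 c
  have h5 : Nat.testBit 255 c = true := by interval_cases c <;> decide
  have h0 := Nat.testBit_zero ((x &&& 255) >>> c)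
  rw [h3, h4, h5, Bool.and_true] at h0
  rw [Nat.and_one_is_mod]
  by_cases hb : x.testBit c = true
  · rw [hb] at h0
    have h1 : ((x &&& 255) >>> c) % 2 = 1 := of_decide_eq_true h0.symm
    simp [hb, h1]
  · have hb' : x.testBit c = false := by revert hb; cases x.testBit c <;> simp
    rw [hb'] at h0
    have h2 : ((x &&& 255) >>> c) % 2 = 0 := by
      have := of_decide_eq_false h0.symm
      omega
    simp [hb', h2]

-- the grid after the decomposition loop holds exactly the bits of v
theorem A_entry (v nN i m : Nat) (him : m < 8) (hin : i < nN) :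
    E (applyBits v (List.replicate nN ([0, 0, 0, 0, 0, 0, 0, 0] : List Int))) i m
      = if v.testBit (8 * i + m) then 1 else 0 := by
  have hrows : gridRows8 (List.replicate nN ([0, 0, 0, 0, 0, 0, 0, 0] : List Int)) := by
    intro j hj
    rw [List.length_replicate] at hj
    rw [List.getD_eq_getElem _ _ (by simpa using hj), List.getElem_replicate]
    rfl
  rw [E_applyBits v _ i m him hrows, List.length_replicate]
  unfold E
  have houter : (List.replicate nN ([0, 0, 0, 0, 0, 0, 0, 0] : List Int)).getD i [] = [0, 0, 0, 0, 0, 0, 0, 0] := by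
    rw [List.getD_eq_getElem _ _ (by simpa using hin), List.getElem_replicate]
  rw [houter]
  have hz : (([0, 0, 0, 0, 0, 0, 0, 0] : List Int)).getD m 0 = 0 := by
    interval_cases m <;> rfl
  rw [hz]
  simp [hin]

-- ===== VERDICT (by name: the statement is the Claim_ definition above) =====
theorem encodeToBinary_spec : Claim_equal_encodeToBinary := by
  intro value octet _
  show encodeToBinary value octet = encodeToBinary_alt value octet
  simp only [encodeToBinary, encodeToBinary_alt]
  rw [growOctet_eq, initGrid, aLoop_eq_applyBits,
    PySem.List.foldl_append_singleton_eq_map, List.nil_append,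
    PySem.List.pyRange_neg_one, PySem.List.pyRange_neg_one]
  simp only [List.map_map]
  set v := value.natAbs with hv
  set n : Int := if 0 < v then max octet (PySem.Int.floordiv ((PySem.Int.bitLength (v : Int) : Int) + 7) 8) else octet with hn
  have hsub : (n - 1 - (-1)) = n := by ring
  rw [hsub]
  have hrows := rows8_applyBits v (List.replicate n.toNat ([0, 0, 0, 0, 0, 0, 0, 0] : List Int))
    (by
      intro j hj
      rw [List.length_replicate] at hj
      rw [List.getD_eq_getElem _ _ (by simpa using hj), List.getElem_replicate]
      rfl)
  have hGlen : (applyBits v (List.replicate n.toNat ([0, 0, 0, 0, 0, 0, 0, 0] : List Int))).length = n.toNat := by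
    rw [applyBits_length, List.length_replicate]
  apply List.ext_getElem
  · simp [hGlen]
  · intro j h1 h2
    have hjn : j < n.toNat := by simpa [hGlen] using h1
    rw [List.getElem_map, List.getElem_map, List.getElem_reverse, List.getElem_range]
    simp only [Function.comp, hGlen]
    have hiG : n.toNat - 1 - j < (applyBits v (List.replicate n.toNat ([0, 0, 0, 0, 0, 0, 0, 0] : List Int))).length := by
      omega
    have hrowlen : ((applyBits v (List.replicate n.toNat ([0, 0, 0, 0, 0, 0, 0, 0] : List Int)))[n.toNat - 1 - j]'hiG).length = 8 := by
      have hr := hrows (n.toNat - 1 - j) (by omega)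
      rw [List.getD_eq_getElem _ _ hiG] at hr
      exact hr
    apply List.ext_getElem
    · simp [hrowlen]
    · intro m hm1 hm2
      have hm8 : m < 8 := by simpa [hrowlen] using hm1
      rw [List.getElem_reverse, List.getElem_map, List.getElem_range]
      simp only [hrowlen]
      have hL : ((applyBits v (List.replicate n.toNat ([0, 0, 0, 0, 0, 0, 0, 0] : List Int)))[n.toNat - 1 - j]'hiG)[8 - 1 - m]'(by omega)
          = E (applyBits v (List.replicate n.toNat ([0, 0, 0, 0, 0, 0, 0, 0] : List Int))) (n.toNat - 1 - j) (8 - 1 - m) := by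
        unfold E
        rw [List.getD_eq_getElem _ _ hiG, List.getD_eq_getElem _ _ (by omega)]
      rw [hL, A_entry v n.toNat _ _ (by omega) (by omega)]
      simp only [Function.comp_apply]
      have ht1 : ((7 : Int) - (m : Int)).toNat = 7 - m := by omega
      have ht2 : (n - 1 - (j : Int)).toNat = n.toNat - 1 - j := by omega
      rw [ht1, ht2, bit_extract _ _ (by omega), Nat.testBit_shiftRight]
      have he : 8 - 1 - m = 7 - m := by omega
      rw [he]
      by_cases hb : v.testBit (8 * (n.toNat - 1 - j) + (7 - m)) <;> simp [hb]
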